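-- pv_equiv track=rewrite | github.com/sh95fit/CodingTest | 백준/Silver/1235. 학생 번호/학생 번호.py | min_unique_suffix_length
-- ===== SOURCE A (Python) =====
-- def min_unique_suffix_length(N, student_numbers):
--     length = len(student_numbers[0])
--
--     for k in range(1, length + 1):
--         seen = set()
--
--         for number in student_numbers:
--             suffix = number[-k:]
--             seen.add(suffix)
--
--         if len(seen) == N:
--             return k
--
--     return length
-- ===== SOURCE B (Python) =====
-- def min_unique_suffix_length(N, student_numbers):
--     length = len(student_numbers[0])
--
--     def cnt(k):
--         return len({number[-k:] for number in student_numbers})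
--
--     if length == 0 or cnt(length) < N:
--         return length
--     lo, hi = 1, length
--     while lo < hi:
--         mid = (lo + hi) // 2
--         if cnt(mid) >= N:
--             hi = mid
--         else:
--             lo = mid + 1
--     return lo if cnt(lo) == N else length
-- ===== Notes on version B (the rewrite author's own statement) =====
-- stated objective: faster
-- what changed: Replaces A's linear scan over suffix lengths k=1..length with a binary search on k, valid because the number of distinct length-k suffixes is nondecreasing in k; the distinct-suffix count is evaluated O(log length) times instead of O(length) times.
import Mathlib
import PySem

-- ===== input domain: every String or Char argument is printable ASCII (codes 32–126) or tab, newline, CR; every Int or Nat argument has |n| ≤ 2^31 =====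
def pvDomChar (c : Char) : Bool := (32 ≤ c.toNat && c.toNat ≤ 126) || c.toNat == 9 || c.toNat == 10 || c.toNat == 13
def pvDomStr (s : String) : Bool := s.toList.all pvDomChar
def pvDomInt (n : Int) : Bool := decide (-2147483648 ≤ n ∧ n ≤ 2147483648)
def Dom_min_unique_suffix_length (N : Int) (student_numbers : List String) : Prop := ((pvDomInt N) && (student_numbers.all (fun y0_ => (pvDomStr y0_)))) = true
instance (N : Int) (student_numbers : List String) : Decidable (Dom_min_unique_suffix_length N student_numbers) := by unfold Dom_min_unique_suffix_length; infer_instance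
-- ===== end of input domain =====

-- B replaces A's linear scan over suffix lengths k = 1..length by a binary search on k
-- (the number of distinct length-k suffixes is nondecreasing in k), evaluating the
-- distinct-suffix count O(log length) times instead of O(length) times.

-- shared helper: number[-k:]
def pvSuffix (k : Int) (number : String) : String := PySem.Str.slice number (some (-k)) none

-- ===== PORT A =====
def pvSeenA (k : Int) (student_numbers : List String) : PySem.Set String :=
  student_numbers.foldl (fun seen number => PySem.Set.add seen (pvSuffix k number)) PySem.Set.empty

def pvLoopA (N : Int) (student_numbers : List String) : List Int → Option Int
  | [] => none
  | k :: ks =>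
      if ((pvSeenA k student_numbers).length : Int) = N then some k
      else pvLoopA N student_numbers ks

def min_unique_suffix_length (N : Int) (student_numbers : List String) : Int :=
  let length : Int := PySem.Str.len ((PySem.List.pyGet? student_numbers 0).getD "")
  match pvLoopA N student_numbers (PySem.List.pyRange 1 (length + 1)) with
  | some k => k
  | none => length

-- ===== PORT B =====
def pvCnt (k : Int) (student_numbers : List String) : Int :=
  ((PySem.Set.ofList (student_numbers.map (fun number => pvSuffix k number))).length : Int)

def pvBsearch (N : Int) (student_numbers : List String) : Nat → Int → Int → Int
  | 0, lo, _ => lo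
  | fuel + 1, lo, hi =>
      if lo < hi then
        let mid := PySem.Int.floordiv (lo + hi) 2
        if N ≤ pvCnt mid student_numbers then pvBsearch N student_numbers fuel lo mid
        else pvBsearch N student_numbers fuel (mid + 1) hi
      else lo

def min_unique_suffix_length_alt (N : Int) (student_numbers : List String) : Int :=
  let length : Int := PySem.Str.len ((PySem.List.pyGet? student_numbers 0).getD "")
  if length = 0 ∨ pvCnt length student_numbers < N then length
  else
    let lo := pvBsearch N student_numbers length.toNat 1 length
    if pvCnt lo student_numbers = N then lo else length

-- ===== PRECONDITION & SPEC =====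
-- Pre_ excludes only the empty list, on which A raises IndexError (student_numbers[0]).
def Pre_min_unique_suffix_length (N : Int) (student_numbers : List String) : Prop :=
  student_numbers ≠ []
instance (N : Int) (student_numbers : List String) : Decidable (Pre_min_unique_suffix_length N student_numbers) := by unfold Pre_min_unique_suffix_length; infer_instance

def pvWitness_min_unique_suffix_length : Int × List String := (2, ["ab", "bb"])

def Spec_min_unique_suffix_length (N : Int) (student_numbers : List String) (out : Int) : Prop := out = min_unique_suffix_length_alt N student_numbers
instance (N : Int) (student_numbers : List String) (out : Int) : Decidable (Spec_min_unique_suffix_length N student_numbers out) := by unfold Spec_min_unique_suffix_length; infer_instance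

-- ===== CLAIM (what is proved, stated in full; the proofs are below) =====
def Claim_equal_min_unique_suffix_length : Prop := ∀ (N : Int) (student_numbers : List String), Dom_min_unique_suffix_length N student_numbers → Pre_min_unique_suffix_length N student_numbers → Spec_min_unique_suffix_length N student_numbers (min_unique_suffix_length N student_numbers)

-- ===== LEMMAS AND PROOFS =====

-- A's seen-set is set(map(suffix, student_numbers)).
theorem pvSeenA_eq (k : Int) (nums : List String) :
    pvSeenA k nums = PySem.Set.ofList (nums.map (fun n => pvSuffix k n)) := by
  rw [pvSeenA, PySem.Set.ofList_eq_foldl, List.foldl_map]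
  rfl

-- suffix composition: taking the last j chars of the last j' chars is the last j chars.
theorem pvSuffix_comp (j j' : Int) (s : String) (hj : 1 ≤ j) (hjj : j ≤ j') :
    pvSuffix j (pvSuffix j' s) = pvSuffix j s := by
  apply String.toList_inj.mp
  simp only [pvSuffix, PySem.Str.toList_slice, PySem.Chars.slice_eq_listSlice]
  have h1 : -j = -((j.toNat : Nat) : Int) := by omega
  have h2 : -j' = -((j'.toNat : Nat) : Int) := by omega
  rw [h1, h2,
    PySem.List.slice_from_neg_natCast _ j'.toNat (by omega),
    PySem.List.slice_from_neg_natCast _ j.toNat (by omega),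
    PySem.List.slice_from_neg_natCast _ j.toNat (by omega)]
  rw [List.drop_drop, List.length_drop]
  congr 1
  omega

-- the number of distinct images is at most the number of distinct elements.
theorem pvCard_image_le (f : String → String) (l : List String) :
    (PySem.Set.ofList (l.map f)).length ≤ (PySem.Set.ofList l).length := by
  have e1 : (PySem.Set.ofList (l.map f)).toFinset = l.toFinset.image f := by
    ext x; simp [PySem.Set.mem_ofList, List.mem_map]
  have e2 : (PySem.Set.ofList l).toFinset = l.toFinset := by
    ext x; simp [PySem.Set.mem_ofList]
  rw [← List.toFinset_card_of_nodup (PySem.Set.nodup_ofList _),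
      ← List.toFinset_card_of_nodup (PySem.Set.nodup_ofList _), e1, e2]
  exact Finset.card_image_le

-- the distinct-suffix count is nondecreasing in the suffix length.
theorem pvCnt_mono (nums : List String) (j j' : Int) (hj : 1 ≤ j) (hjj : j ≤ j') :
    pvCnt j nums ≤ pvCnt j' nums := by
  have hmap : nums.map (fun n => pvSuffix j n)
      = (nums.map (fun n => pvSuffix j' n)).map (fun n => pvSuffix j n) := by
    rw [List.map_map]
    exact List.map_congr_left (fun x _ => (pvSuffix_comp j j' x hj hjj).symm)
  rw [pvCnt, pvCnt, hmap]
  exact_mod_cast pvCard_image_le (fun n => pvSuffix j n) (nums.map (fun n => pvSuffix j' n))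

-- A's scan over range(a,b) returns None when the test fails everywhere.
theorem pvLoopA_none (N : Int) (nums : List String) :
    ∀ (n : Nat) (a b : Int), (b - a).toNat = n →
      (∀ k, a ≤ k → k < b → ((pvSeenA k nums).length : Int) ≠ N) →
      pvLoopA N nums (PySem.List.pyRange a b) = none := by
  intro n
  induction n with
  | zero =>
      intro a b hn _
      rw [PySem.List.pyRange_one_eq_nil (by omega)]
      rfl
  | succ m ih =>
      intro a b hn h
      rcases lt_or_ge a b with hab | hab
      · rw [PySem.List.pyRange_one_cons hab]
        simp only [pvLoopA, if_neg (h a le_rfl hab)]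
        exact ih (a + 1) b (by omega) (fun k hk1 hk2 => h k (by omega) hk2)
      · rw [PySem.List.pyRange_one_eq_nil hab]
        rfl

-- A's scan returns the first k in range(a,b) passing the test.
theorem pvLoopA_some (N : Int) (nums : List String) :
    ∀ (n : Nat) (a b r : Int), (r - a).toNat = n → a ≤ r → r < b →
      ((pvSeenA r nums).length : Int) = N →
      (∀ k, a ≤ k → k < r → ((pvSeenA k nums).length : Int) ≠ N) →
      pvLoopA N nums (PySem.List.pyRange a b) = some r := by
  intro n
  induction n with
  | zero =>
      intro a b r hn ha hb hr _
      have har : a = r := by omega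
      subst har
      rw [PySem.List.pyRange_one_cons hb]
      simp only [pvLoopA, if_pos hr]
  | succ m ih =>
      intro a b r hn ha hb hr h
      have har : a < r := by omega
      rw [PySem.List.pyRange_one_cons (by omega)]
      simp only [pvLoopA, if_neg (h a le_rfl har)]
      exact ih (a + 1) b r (by omega) (by omega) hb hr (fun k hk1 hk2 => h k (by omega) hk2)

-- binary-search invariant: the result is the least k ≥ lo with N ≤ cnt k.
theorem pvBsearch_spec (N : Int) (nums : List String) :
    ∀ (fuel : Nat) (lo hi : Int), 1 ≤ lo → lo ≤ hi → (hi - lo).toNat ≤ fuel →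
      N ≤ pvCnt hi nums →
      lo ≤ pvBsearch N nums fuel lo hi ∧ pvBsearch N nums fuel lo hi ≤ hi ∧
      N ≤ pvCnt (pvBsearch N nums fuel lo hi) nums ∧
      ∀ j, lo ≤ j → j < pvBsearch N nums fuel lo hi → pvCnt j nums < N := by
  intro fuel
  induction fuel with
  | zero =>
      intro lo hi h1 h2 h3 h4
      have : lo = hi := by omega
      subst this
      simp only [pvBsearch]
      exact ⟨le_rfl, le_rfl, h4, fun j hj1 hj2 => absurd hj2 (by omega)⟩
  | succ m ih =>
      intro lo hi h1 h2 h3 h4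
      by_cases hlh : lo < hi
      · have hmid := PySem.Int.floordiv_two_mid_bounds (le_of_lt hlh)
        have hmlt : PySem.Int.floordiv (lo + hi) 2 < hi :=
          (PySem.Int.floordiv_lt_iff_lt_mul (by norm_num)).mpr (by omega)
        simp only [pvBsearch, if_pos hlh]
        by_cases hc : N ≤ pvCnt (PySem.Int.floordiv (lo + hi) 2) nums
        · rw [if_pos hc]
          have := ih lo (PySem.Int.floordiv (lo + hi) 2) h1 hmid.1 (by omega) hc
          exact ⟨this.1, le_trans this.2.1 (le_of_lt hmlt), this.2.2.1, this.2.2.2⟩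
        · rw [if_neg hc]
          push_neg at hc
          have := ih (PySem.Int.floordiv (lo + hi) 2 + 1) hi (by omega) (by omega) (by omega) h4
          refine ⟨by omega, this.2.1, this.2.2.1, ?_⟩
          intro j hj1 hj2
          rcases le_or_gt j (PySem.Int.floordiv (lo + hi) 2) with hj3 | hj3
          · exact lt_of_le_of_lt (pvCnt_mono nums j _ (by omega) hj3) hc
          · exact this.2.2.2 j (by omega) hj2
      · have : lo = hi := by omega
        subst this
        simp only [pvBsearch, if_neg hlh]
        exact ⟨le_rfl, le_rfl, h4, fun j hj1 hj2 => absurd hj2 (by omega)⟩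

-- ===== VERDICT (by name: the statement is the Claim_ definition above) =====
theorem min_unique_suffix_length_spec : Claim_equal_min_unique_suffix_length := by
  intro N nums _ _
  unfold Spec_min_unique_suffix_length
  set L : Int := PySem.Str.len ((PySem.List.pyGet? nums 0).getD "") with hLdef
  have hA : min_unique_suffix_length N nums
      = (match pvLoopA N nums (PySem.List.pyRange 1 (L + 1)) with
         | some k => k
         | none => L) := rfl
  have hB : min_unique_suffix_length_alt N nums
      = (if L = 0 ∨ pvCnt L nums < N then L
         else if pvCnt (pvBsearch N nums L.toNat 1 L) nums = N then pvBsearch N nums L.toNat 1 L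
         else L) := rfl
  rw [hA, hB]
  have hL0 : 0 ≤ L := by
    rw [hLdef, PySem.Str.len_eq]; exact_mod_cast Nat.zero_le _
  by_cases hL : L = 0
  · rw [if_pos (Or.inl hL), hL]
    rw [show (0 : Int) + 1 = 1 from rfl, PySem.List.pyRange_one_eq_nil (by omega)]
    rfl
  · by_cases hbig : pvCnt L nums < N
    · rw [if_pos (Or.inr hbig)]
      rw [pvLoopA_none N nums (L + 1 - 1).toNat 1 (L + 1) rfl ?_]
      intro k hk1 hk2
      rw [pvSeenA_eq]
      have : pvCnt k nums ≤ pvCnt L nums := pvCnt_mono nums k L hk1 (by omega)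
      simp only [pvCnt] at this hbig ⊢
      omega
    · rw [if_neg (by push_neg; exact ⟨hL, by omega⟩)]
      push_neg at hbig
      have hspec := pvBsearch_spec N nums L.toNat 1 L (le_refl 1) (by omega) (by omega) hbig
      set r : Int := pvBsearch N nums L.toNat 1 L with hrdef
      obtain ⟨hr1, hr2, hr3, hr4⟩ := hspec
      by_cases heq : pvCnt r nums = N
      · rw [if_pos heq]
        rw [pvLoopA_some N nums (r - 1).toNat 1 (L + 1) r rfl hr1 (by omega)
          (by rw [pvSeenA_eq]; exact heq)
          (fun k hk1 hk2 => by rw [pvSeenA_eq]; exact ne_of_lt (hr4 k hk1 hk2))]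
      · rw [if_neg heq]
        rw [pvLoopA_none N nums (L + 1 - 1).toNat 1 (L + 1) rfl ?_]
        intro k hk1 hk2
        rw [pvSeenA_eq]
        rcases lt_or_ge k r with hkr | hkr
        · exact ne_of_lt (hr4 k hk1 hkr)
        · have : pvCnt r nums ≤ pvCnt k nums := pvCnt_mono nums r k (by omega) hkr
          have hgt : N < pvCnt r nums := lt_of_le_of_ne hr3 (fun h => heq h.symm)
          simp only [pvCnt] at this hgt ⊢
          omega
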